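-- pv_equiv track=rewrite | github.com/ptaejoon/SProject | TJ_rest_server/bvserver/food_extract.py | percentage_deletion
-- ===== SOURCE A (Python) =====
-- def percentage_deletion(string):
-- 	ch = 0
-- 	while ch < len(string):
-- 		if string[ch]<= '9' and string[ch] >= '0':
-- 			if len(string) > ch+1 and string[ch+1] is '%':
-- 				word = string[ch:ch+1]
-- 				string = string.replace(word,' ')
-- 				break
-- 			if len(string) > ch+2 and string[ch+2] is '%':
-- 				word = string[ch:ch+2]
-- 				string = string.replace(word,' ')
-- 				break
-- 		ch = ch+1
-- 	return string
-- ===== SOURCE B (Python) =====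
-- def percentage_deletion(string):
--     start = 0
--     while True:
--         pos = string.find('%', start)
--         if pos == -1:
--             return string
--         if pos >= 2 and '0' <= string[pos - 2] <= '9':
--             return string.replace(string[pos - 2:pos], ' ')
--         if pos >= 1 and '0' <= string[pos - 1] <= '9':
--             return string.replace(string[pos - 1], ' ')
--         start = pos + 1
-- ===== Notes on version B (the rewrite author's own statement) =====
-- stated objective: alternative
-- what changed: B scans only the occurrences of '%' via str.find with a moving start offset and inspects the one or two characters before each, instead of A's per-character while-loop over every index looking ahead for '%'.
import Mathlib
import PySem

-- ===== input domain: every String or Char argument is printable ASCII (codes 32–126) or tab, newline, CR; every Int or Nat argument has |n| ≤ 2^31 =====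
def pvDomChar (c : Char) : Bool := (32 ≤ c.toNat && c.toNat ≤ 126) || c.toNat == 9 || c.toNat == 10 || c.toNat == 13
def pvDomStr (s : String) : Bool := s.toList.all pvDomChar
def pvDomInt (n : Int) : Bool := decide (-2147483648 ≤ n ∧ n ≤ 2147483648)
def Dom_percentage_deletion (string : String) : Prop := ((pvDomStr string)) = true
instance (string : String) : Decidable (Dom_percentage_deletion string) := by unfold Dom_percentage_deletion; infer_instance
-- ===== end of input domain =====

-- B replaces A's per-index while-loop by a scan over the '%' occurrences only (str.find with a start
-- offset), looking back one or two characters; objective: alternative traversal of the same task.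

-- ===== PORT A =====
-- digit test as A writes it: string[ch] <= '9' and string[ch] >= '0'
def pvDigitA (c : Char) : Bool := decide (c ≤ '9' ∧ '0' ≤ c)

-- A's while-loop; getD is exact because every access is guarded by the same length check A makes
def pvLoopA (s : List Char) (ch : Nat) : List Char :=
  if ch < s.length then
    if pvDigitA (s.getD ch ' ') = true then
      if ch + 1 < s.length ∧ s.getD (ch + 1) ' ' = '%' then
        PySem.Chars.replace s (PySem.List.slice s (some (ch : Int)) (some ((ch : Int) + 1))) [' ']
      else if ch + 2 < s.length ∧ s.getD (ch + 2) ' ' = '%' then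
        PySem.Chars.replace s (PySem.List.slice s (some (ch : Int)) (some ((ch : Int) + 2))) [' ']
      else pvLoopA s (ch + 1)
    else pvLoopA s (ch + 1)
  else s
termination_by s.length - ch
decreasing_by all_goals omega

def percentage_deletion (string : String) : String :=
  String.ofList (pvLoopA string.toList 0)

-- ===== PORT B =====
-- digit test as B writes it: '0' <= c <= '9'
def pvDigitB (c : Char) : Bool := decide ('0' ≤ c ∧ c ≤ '9')

-- s.find(sub, start) returns -1 when start is past the end (used only for termination)
theorem pvFindFrom_past (s sub : List Char) (k : Nat) (h : s.length < k) :
    PySem.Chars.findFrom s sub (k : Int) = -1 := by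
  unfold PySem.Chars.findFrom
  have h1 : ¬((k : Int) < 0) := by omega
  simp only [h1, if_false]
  rw [if_pos (by exact_mod_cast h)]

-- a prefix '%' of s.drop p pins s.getD p and the bound p < s.length (termination + proofs)
theorem pvPrefixPct {s : List Char} {p : Nat} (h : ['%'] <+: s.drop p) :
    p < s.length ∧ s.getD p ' ' = '%' := by
  rcases h with ⟨t, ht⟩
  have hl : p < s.length := by
    by_contra hp
    rw [List.drop_eq_nil_iff.mpr (by omega)] at ht
    simp at ht
  rw [List.drop_eq_getElem_cons hl, List.singleton_append] at ht
  injection ht with hc _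
  exact ⟨hl, by rw [List.getD_eq_getElem s ' ' hl, ← hc]⟩

-- B's find-loop over the '%' occurrences; getD is exact: the index is guarded by 2 ≤ pos / 1 ≤ pos
-- and pos < len(s) (find returns an index of an occurrence)
def pvLoopB (s : List Char) (start : Nat) : List Char :=
  let pos := PySem.Chars.findFrom s ['%'] (start : Int)
  if h1 : pos = -1 then s
  else
    if 2 ≤ pos ∧ pvDigitB (s.getD (pos - 2).toNat ' ') = true then
      PySem.Chars.replace s (PySem.List.slice s (some (pos - 2)) (some pos)) [' ']
    else if 1 ≤ pos ∧ pvDigitB (s.getD (pos - 1).toNat ' ') = true then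
      PySem.Chars.replace s [s.getD (pos - 1).toNat ' '] [' ']
    else pvLoopB s (pos.toNat + 1)
termination_by s.length - start
decreasing_by
  have hle : start ≤ s.length := by
    by_contra hgt
    exact h1 (pvFindFrom_past s ['%'] start (by omega))
  obtain ⟨hk, hpre, -⟩ := PySem.Chars.findFrom_natCast_spec s ['%'] start hle h1
  have hlt := (pvPrefixPct hpre).1
  omega

def percentage_deletion_alt (string : String) : String :=
  String.ofList (pvLoopB string.toList 0)

-- ===== PRECONDITION & SPEC =====
def Spec_percentage_deletion (string : String) (out : String) : Prop := out = percentage_deletion_alt string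
instance (string : String) (out : String) : Decidable (Spec_percentage_deletion string out) := by unfold Spec_percentage_deletion; infer_instance

-- ===== CLAIM (what is proved, stated in full; the proofs are below) =====
def Claim_equal_percentage_deletion : Prop := ∀ (string : String), Dom_percentage_deletion string → Spec_percentage_deletion string (percentage_deletion string)

-- ===== LEMMAS AND PROOFS =====

-- A fires at index i iff pvQ s i; the word it removes is pvWord s i
def pvQ (s : List Char) (i : Nat) : Prop :=
  i < s.length ∧ pvDigitA (s.getD i ' ') = true ∧
    ((i + 1 < s.length ∧ s.getD (i + 1) ' ' = '%') ∨ (i + 2 < s.length ∧ s.getD (i + 2) ' ' = '%'))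

def pvWord (s : List Char) (i : Nat) : List Char :=
  if i + 1 < s.length ∧ s.getD (i + 1) ' ' = '%' then [s.getD i ' ']
  else [s.getD i ' ', s.getD (i + 1) ' ']

-- B fires at a '%' position p iff pvR s p; the word it removes is pvWordB s p
def pvR (s : List Char) (p : Nat) : Prop :=
  p < s.length ∧ s.getD p ' ' = '%' ∧
    ((2 ≤ p ∧ pvDigitB (s.getD (p - 2) ' ') = true) ∨ (1 ≤ p ∧ pvDigitB (s.getD (p - 1) ' ') = true))

def pvWordB (s : List Char) (p : Nat) : List Char :=
  if 2 ≤ p ∧ pvDigitB (s.getD (p - 2) ' ') = true then [s.getD (p - 2) ' ', s.getD (p - 1) ' ']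
  else [s.getD (p - 1) ' ']

theorem pvDigitA_eq (c : Char) : pvDigitA c = pvDigitB c := by
  simp [pvDigitA, pvDigitB, and_comm]

-- the converse of pvPrefixPct
theorem pvPctPrefix {s : List Char} {p : Nat} (h1 : p < s.length) (h2 : s.getD p ' ' = '%') :
    ['%'] <+: s.drop p := by
  rw [List.drop_eq_getElem_cons h1]
  refine ⟨s.drop (p + 1), ?_⟩
  rw [List.getD_eq_getElem s ' ' h1] at h2
  rw [List.singleton_append, h2]

theorem pvLoopA_none (s : List Char) (ch : Nat) (h : ∀ i, ch ≤ i → ¬ pvQ s i) :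
    pvLoopA s ch = s := by
  suffices H : ∀ n ch, s.length + 1 - ch < n → (∀ i, ch ≤ i → ¬ pvQ s i) → pvLoopA s ch = s from
    H (s.length + 2) ch (by omega) h
  intro n
  induction n with
  | zero => intro ch hn _; omega
  | succ n ih =>
    intro ch hn h
    rw [pvLoopA.eq_def]
    split_ifs with hlen hdig hc1 hc2
    · exact absurd ⟨hlen, hdig, Or.inl hc1⟩ (h ch le_rfl)
    · exact absurd ⟨hlen, hdig, Or.inr hc2⟩ (h ch le_rfl)
    · exact ih (ch + 1) (by omega) (fun i hi => h i (by omega))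
    · exact ih (ch + 1) (by omega) (fun i hi => h i (by omega))
    · rfl

theorem pvSliceOne {s : List Char} {i : Nat} (h : i < s.length) :
    PySem.List.slice s (some (i : Int)) (some ((i : Int) + 1)) = [s.getD i ' '] := by
  have h1 := PySem.List.slice_natCast_add s i 1
  push_cast at h1
  rw [h1, List.drop_eq_getElem_cons h, List.getD_eq_getElem s ' ' h]
  rfl

theorem pvSliceTwo {s : List Char} {i : Nat} (h : i + 1 < s.length) :
    PySem.List.slice s (some (i : Int)) (some ((i : Int) + 2)) = [s.getD i ' ', s.getD (i + 1) ' '] := by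
  have h1 := PySem.List.slice_natCast_add s i 2
  push_cast at h1
  rw [h1, List.drop_eq_getElem_cons (by omega : i < s.length), List.drop_eq_getElem_cons h,
    List.getD_eq_getElem s ' ' (by omega : i < s.length), List.getD_eq_getElem s ' ' h]
  rfl

theorem pvLoopA_found (s : List Char) (i₀ : Nat) (hq : pvQ s i₀)
    (hmin : ∀ i, i < i₀ → ¬ pvQ s i) (ch : Nat) (hch : ch ≤ i₀) :
    pvLoopA s ch = PySem.Chars.replace s (pvWord s i₀) [' '] := by
  suffices H : ∀ n ch, i₀ - ch < n → ch ≤ i₀ →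
      pvLoopA s ch = PySem.Chars.replace s (pvWord s i₀) [' '] from H (i₀ + 1) ch (by omega) hch
  intro n
  induction n with
  | zero => intro ch hn _; omega
  | succ n ih =>
    intro ch hn hch
    rw [pvLoopA.eq_def]
    split_ifs with hlen hdig hc1 hc2
    · rcases Nat.lt_or_ge ch i₀ with hlt | hge
      · exact absurd ⟨hlen, hdig, Or.inl hc1⟩ (hmin ch hlt)
      · have he : ch = i₀ := by omega
        subst he
        rw [pvWord, if_pos hc1, pvSliceOne hlen]
    · rcases Nat.lt_or_ge ch i₀ with hlt | hge
      · exact absurd ⟨hlen, hdig, Or.inr hc2⟩ (hmin ch hlt)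
      · have he : ch = i₀ := by omega
        subst he
        rw [pvWord, if_neg hc1, pvSliceTwo (by omega : ch + 1 < s.length)]
    · have hlt : ch < i₀ := by
        rcases Nat.lt_or_ge ch i₀ with hlt | hge
        · exact hlt
        · have he : ch = i₀ := by omega
          subst he
          rcases hq.2.2 with hcc | hcc
          · exact absurd hcc hc1
          · exact absurd hcc hc2
      exact ih (ch + 1) (by omega) (by omega)
    · have hlt : ch < i₀ := by
        rcases Nat.lt_or_ge ch i₀ with hlt | hge
        · exact hlt
        · have he : ch = i₀ := by omega
          subst he
          exact absurd hq.2.1 hdig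
      exact ih (ch + 1) (by omega) (by omega)
    · exact absurd (by have := hq.1; omega : ch < s.length) hlen

theorem pvLoopB_none (s : List Char) (st : Nat) (h : ∀ p, st ≤ p → ¬ pvR s p) :
    pvLoopB s st = s := by
  suffices H : ∀ n st, s.length + 1 - st < n → (∀ p, st ≤ p → ¬ pvR s p) → pvLoopB s st = s from
    H (s.length + 2) st (by omega) h
  intro n
  induction n with
  | zero => intro st hn _; omega
  | succ n ih =>
    intro st hn h
    rw [pvLoopB.eq_def]
    by_cases hf : PySem.Chars.findFrom s ['%'] (st : Int) = -1
    · simp only [hf, dif_pos]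
    · have hle : st ≤ s.length := by
        by_contra hgt
        exact hf (pvFindFrom_past s ['%'] st (by omega))
      obtain ⟨hk, hpre, -⟩ := PySem.Chars.findFrom_natCast_spec s ['%'] st hle hf
      obtain ⟨hplen, hpct⟩ := pvPrefixPct hpre
      simp only [hf, dif_neg, not_false_iff]
      set pos := PySem.Chars.findFrom s ['%'] (st : Int) with hpos
      split_ifs with hb1 hb2
      · exfalso
        refine h pos.toNat (by omega) ⟨hplen, hpct, Or.inl ⟨?_, ?_⟩⟩
        · omega
        · have : (pos - 2).toNat = pos.toNat - 2 := by omega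
          rw [← this]; exact hb1.2
      · exfalso
        refine h pos.toNat (by omega) ⟨hplen, hpct, Or.inr ⟨?_, ?_⟩⟩
        · omega
        · have : (pos - 1).toNat = pos.toNat - 1 := by omega
          rw [← this]; exact hb2.2
      · exact ih (pos.toNat + 1) (by omega) (fun p hp => h p (by omega))

theorem pvLoopB_found (s : List Char) (p₀ : Nat) (hr : pvR s p₀)
    (hmin : ∀ p, p < p₀ → ¬ pvR s p) (st : Nat) (hst : st ≤ p₀) :
    pvLoopB s st = PySem.Chars.replace s (pvWordB s p₀) [' '] := by
  suffices H : ∀ n st, p₀ - st < n → st ≤ p₀ →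
      pvLoopB s st = PySem.Chars.replace s (pvWordB s p₀) [' '] from H (p₀ + 1) st (by omega) hst
  intro n
  induction n with
  | zero => intro st hn _; omega
  | succ n ih =>
    intro st hn hst
    have hp₀len : p₀ < s.length := hr.1
    have hle : st ≤ s.length := by omega
    have hf : PySem.Chars.findFrom s ['%'] (st : Int) ≠ -1 := by
      intro hno
      rw [PySem.Chars.findFrom_natCast_eq_neg_one_iff s ['%'] st hle] at hno
      apply hno
      obtain ⟨t, ht⟩ := pvPctPrefix hp₀len hr.2.1
      have hdd : s.drop p₀ = (s.drop st).drop (p₀ - st) := by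
        rw [List.drop_drop]
        congr 1
        omega
      rw [hdd] at ht
      exact ⟨(s.drop st).take (p₀ - st), t, by
        rw [List.append_assoc, ht, List.take_append_drop]⟩
    obtain ⟨hk, hpre, hmin'⟩ := PySem.Chars.findFrom_natCast_spec s ['%'] st hle hf
    obtain ⟨hplen, hpct⟩ := pvPrefixPct hpre
    have hple : (PySem.Chars.findFrom s ['%'] (st : Int)).toNat ≤ p₀ := by
      by_contra hgt
      exact hmin' p₀ hst (by omega) (pvPctPrefix hp₀len hr.2.1)
    rw [pvLoopB.eq_def]
    simp only [hf, dif_neg, not_false_iff]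
    set pos := PySem.Chars.findFrom s ['%'] (st : Int) with hpos
    split_ifs with hb1 hb2
    · have heq : pos.toNat = p₀ := by
        rcases Nat.lt_or_ge pos.toNat p₀ with hlt | hge
        · exfalso
          refine hmin pos.toNat hlt ⟨hplen, hpct, Or.inl ⟨by omega, ?_⟩⟩
          have : (pos - 2).toNat = pos.toNat - 2 := by omega
          rw [← this]; exact hb1.2
        · omega
      congr 1
      rw [pvWordB, if_pos]
      · have h2 : pos - 2 = ((p₀ - 2 : Nat) : Int) := by omega
        have hp2 : pos = ((p₀ - 2 : Nat) : Int) + 2 := by omega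
        rw [h2, hp2, pvSliceTwo (by omega : (p₀ - 2) + 1 < s.length)]
        have : p₀ - 2 + 1 = p₀ - 1 := by omega
        rw [this]
      · refine ⟨by omega, ?_⟩
        have : (pos - 2).toNat = p₀ - 2 := by omega
        rw [← this]; exact hb1.2
    · have heq : pos.toNat = p₀ := by
        rcases Nat.lt_or_ge pos.toNat p₀ with hlt | hge
        · exfalso
          refine hmin pos.toNat hlt ⟨hplen, hpct, Or.inr ⟨by omega, ?_⟩⟩
          have : (pos - 1).toNat = pos.toNat - 1 := by omega
          rw [← this]; exact hb2.2
        · omega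
      congr 1
      rw [pvWordB, if_neg]
      · have : (pos - 1).toNat = p₀ - 1 := by omega
        rw [this]
      · intro hcon
        apply hb1
        refine ⟨by omega, ?_⟩
        have : (pos - 2).toNat = p₀ - 2 := by omega
        rw [this]; exact hcon.2
    · have hlt : pos.toNat < p₀ := by
        rcases Nat.lt_or_ge pos.toNat p₀ with hlt | hge
        · exact hlt
        · exfalso
          have heq : pos.toNat = p₀ := by omega
          rcases hr.2.2 with ⟨hh, hd⟩ | ⟨hh, hd⟩
          · apply hb1
            refine ⟨by omega, ?_⟩
            have : (pos - 2).toNat = p₀ - 2 := by omega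
            rw [this]; exact hd
          · apply hb2
            refine ⟨by omega, ?_⟩
            have : (pos - 1).toNat = p₀ - 1 := by omega
            rw [this]; exact hd
      exact ih (pos.toNat + 1) (by omega) (by omega)

theorem pvR_to_Q {s : List Char} {p : Nat} (h : pvR s p) :
    (2 ≤ p ∧ pvDigitB (s.getD (p - 2) ' ') = true → pvQ s (p - 2)) ∧
    (1 ≤ p ∧ pvDigitB (s.getD (p - 1) ' ') = true → pvQ s (p - 1)) := by
  obtain ⟨hlen, hpct, -⟩ := h
  constructor
  · rintro ⟨h2, hd⟩
    refine ⟨by omega, by rw [pvDigitA_eq]; exact hd, Or.inr ⟨by omega, ?_⟩⟩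
    have : p - 2 + 2 = p := by omega
    rw [this]; exact hpct
  · rintro ⟨h1, hd⟩
    refine ⟨by omega, by rw [pvDigitA_eq]; exact hd, Or.inl ⟨by omega, ?_⟩⟩
    have : p - 1 + 1 = p := by omega
    rw [this]; exact hpct

theorem pvMain (s : List Char) : pvLoopA s 0 = pvLoopB s 0 := by
  by_cases hex : ∃ i, pvQ s i
  · haveI : DecidablePred (pvQ s) := fun i => Classical.dec _
    have hq := Nat.find_spec hex
    set i₀ := Nat.find hex with hi₀
    have hmin : ∀ i, i < i₀ → ¬ pvQ s i := fun i hi => Nat.find_min hex hi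
    rw [pvLoopA_found s i₀ hq hmin 0 (Nat.zero_le _)]
    by_cases hc1 : i₀ + 1 < s.length ∧ s.getD (i₀ + 1) ' ' = '%'
    · have hr : pvR s (i₀ + 1) :=
        ⟨hc1.1, hc1.2, Or.inr ⟨by omega, by
          have : i₀ + 1 - 1 = i₀ := by omega
          rw [this, ← pvDigitA_eq]; exact hq.2.1⟩⟩
      have hminR : ∀ p, p < i₀ + 1 → ¬ pvR s p := by
        intro p hp hRp
        rcases hRp.2.2 with ⟨h2, hd⟩ | ⟨h1, hd⟩
        · exact hmin (p - 2) (by omega) ((pvR_to_Q hRp).1 ⟨h2, hd⟩)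
        · exact hmin (p - 1) (by omega) ((pvR_to_Q hRp).2 ⟨h1, hd⟩)
      rw [pvLoopB_found s (i₀ + 1) hr hminR 0 (Nat.zero_le _)]
      congr 1
      rw [pvWord, if_pos hc1, pvWordB, if_neg]
      · have : i₀ + 1 - 1 = i₀ := by omega
        rw [this]
      · rintro ⟨h2, hd⟩
        refine hmin (i₀ - 1) (by omega) ?_
        refine ⟨by omega, ?_, Or.inr ⟨by omega, ?_⟩⟩
        · have : i₀ + 1 - 2 = i₀ - 1 := by omega
          rw [this] at hd
          rw [pvDigitA_eq]; exact hd
        · have : i₀ - 1 + 2 = i₀ + 1 := by omega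
          rw [this]; exact hc1.2
    · have hc2 : i₀ + 2 < s.length ∧ s.getD (i₀ + 2) ' ' = '%' := hq.2.2.resolve_left hc1
      have hr : pvR s (i₀ + 2) :=
        ⟨hc2.1, hc2.2, Or.inl ⟨by omega, by
          have : i₀ + 2 - 2 = i₀ := by omega
          rw [this, ← pvDigitA_eq]; exact hq.2.1⟩⟩
      have hminR : ∀ p, p < i₀ + 2 → ¬ pvR s p := by
        intro p hp hRp
        rcases hRp.2.2 with ⟨h2, hd⟩ | ⟨h1, hd⟩
        · exact hmin (p - 2) (by omega) ((pvR_to_Q hRp).1 ⟨h2, hd⟩)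
        · rcases Nat.lt_or_ge (p - 1) i₀ with hlt | hge
          · exact hmin (p - 1) hlt ((pvR_to_Q hRp).2 ⟨h1, hd⟩)
          · have he : p = i₀ + 1 := by omega
            exact hc1 ⟨by rw [← he]; exact hRp.1, by rw [← he]; exact hRp.2.1⟩
      rw [pvLoopB_found s (i₀ + 2) hr hminR 0 (Nat.zero_le _)]
      congr 1
      rw [pvWord, if_neg hc1, pvWordB, if_pos]
      · have ha : i₀ + 2 - 2 = i₀ := by omega
        have hb : i₀ + 2 - 1 = i₀ + 1 := by omega
        rw [ha, hb]
      · refine ⟨by omega, ?_⟩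
        have : i₀ + 2 - 2 = i₀ := by omega
        rw [this, ← pvDigitA_eq]; exact hq.2.1
  · push Not at hex
    rw [pvLoopA_none s 0 (fun i _ => hex i), pvLoopB_none s 0 ?_]
    intro p _ hRp
    rcases hRp.2.2 with ⟨h2, hd⟩ | ⟨h1, hd⟩
    · exact hex (p - 2) ((pvR_to_Q hRp).1 ⟨h2, hd⟩)
    · exact hex (p - 1) ((pvR_to_Q hRp).2 ⟨h1, hd⟩)

-- ===== VERDICT (by name: the statement is the Claim_ definition above) =====
theorem percentage_deletion_spec : Claim_equal_percentage_deletion := by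
  intro s _dom
  unfold Spec_percentage_deletion percentage_deletion percentage_deletion_alt
  rw [pvMain]
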